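-- pv_equiv track=rewrite | github.com/eitancoronel/AI-Rummikub | RummikubPlayer.py | generate_runs
-- ===== SOURCE A (Python) =====
-- def generate_runs(grouped_by_color):
--     """
--     Generate all valid runs from grouped tiles.
--     Args:
--         grouped_by_color (dict): A dictionary mapping colors to a list of tiles.
--     Returns:
--         list: A list of runs, where each run is a list of tiles.
--     """
--     runs = []
--     for color, tiles in grouped_by_color.items():
--         # Sort tiles by their number, with jokers (None) assigned a very high value.
--         sorted_tiles = sorted(tiles, key=lambda x: x[1] if x[1] is not None else 100)
--
--         run = []  # Current run being built
--         for tile in sorted_tiles: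
--             if not run or (tile[1] is None or run[-1][1] is None or tile[1] == run[-1][1] + 1):
--                 # Add to the current run if it continues the sequence or is a joker
--                 run.append(tile)
--             else:
--                 # Save the current run if it's valid and start a new one
--                 if len(run) >= 3:  # Runs need at least 3 tiles
--                     runs.append(run)
--                 run = [tile]
--
--         # Add the final run if it has at least 3 tiles
--         if len(run) >= 3:
--             runs.append(run)
--
--     return runs
-- ===== SOURCE B (Python) =====
-- def generate_runs(grouped_by_color):
--     runs = []
--     for tiles in grouped_by_color.values():
--         st = sorted(tiles, key=lambda x: 100 if x[1] is None else x[1])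
--         i, n = 0, len(st)
--         while i < n:
--             j = i + 1
--             while j < n and (st[j][1] is None or st[j - 1][1] is None
--                              or st[j][1] == st[j - 1][1] + 1):
--                 j += 1
--             if j - i >= 3:
--                 runs.append(st[i:j])
--             i = j
--     return runs
-- ===== Notes on version B (the rewrite author's own statement) =====
-- stated objective: alternative
-- what changed: Replaces the accumulate-and-flush run accumulator with a two-pointer scan that extracts each maximal consecutive segment of the sorted list as a slice and emits it only when its length is at least 3.
import Mathlib
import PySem

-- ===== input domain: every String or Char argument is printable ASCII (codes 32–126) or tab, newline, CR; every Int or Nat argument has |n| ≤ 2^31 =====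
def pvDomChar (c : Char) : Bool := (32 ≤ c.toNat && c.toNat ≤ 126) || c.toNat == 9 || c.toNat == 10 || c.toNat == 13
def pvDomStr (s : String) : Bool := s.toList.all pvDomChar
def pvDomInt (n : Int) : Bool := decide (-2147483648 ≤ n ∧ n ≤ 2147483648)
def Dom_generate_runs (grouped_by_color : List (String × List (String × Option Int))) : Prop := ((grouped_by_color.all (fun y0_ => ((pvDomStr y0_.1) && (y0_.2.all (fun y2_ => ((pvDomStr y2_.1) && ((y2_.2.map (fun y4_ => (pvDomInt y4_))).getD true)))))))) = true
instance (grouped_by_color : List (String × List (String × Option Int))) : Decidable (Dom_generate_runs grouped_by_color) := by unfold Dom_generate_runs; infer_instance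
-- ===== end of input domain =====

-- B replaces A's accumulate-and-flush run accumulator with a two-pointer maximal-segment scan
-- of the same sorted list, emitting each segment of length ≥ 3 (alternative decomposition, same cost).

-- ===== PORT A =====
-- continuation test shared by both ports: tile[1] is None or prev[1] is None or tile[1] == prev[1] + 1
def contTile (prev tile : String × Option Int) : Bool :=
  tile.2.isNone || prev.2.isNone || decide (tile.2 = prev.2.map (· + 1))

-- one step of A's inner loop over the sorted tiles: state = (runs, current run)
def stepA (st : List (List (String × Option Int)) × List (String × Option Int))
    (tile : String × Option Int) :
    List (List (String × Option Int)) × List (String × Option Int) :=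
  match st.2.getLast? with
  | none => (st.1, st.2 ++ [tile])          -- `not run` : append to current run
  | some last =>
    if contTile last tile then (st.1, st.2 ++ [tile])
    else (if 3 ≤ st.2.length then st.1 ++ [st.2] else st.1, [tile])

def generate_runs (grouped_by_color : List (String × List (String × Option Int))) : List (List (String × Option Int)) :=
  grouped_by_color.foldl (fun runs ct =>
    let sorted_tiles := PySem.List.sorted ct.2 (fun x => x.2.getD 100) false
    let st := sorted_tiles.foldl stepA (runs, [])
    if 3 ≤ st.2.length then st.1 ++ [st.2] else st.1) []

-- ===== PORT B =====
-- inner while loop of B: extend the segment while the continuation predicate holds;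
-- returns (rest of current segment, remaining tiles)
def spanRun (prev : String × Option Int) :
    List (String × Option Int) → List (String × Option Int) × List (String × Option Int)
  | [] => ([], [])
  | u :: us =>
    if contTile prev u then
      let p := spanRun u us
      (u :: p.1, p.2)
    else ([], u :: us)

theorem spanRun_len (prev : String × Option Int) (ts : List (String × Option Int)) :
    (spanRun prev ts).2.length ≤ ts.length := by
  induction ts generalizing prev with
  | nil => simp [spanRun]
  | cons u us ih =>
    simp only [spanRun]
    split
    · exact le_trans (ih u) (by simp)
    · simp

-- outer while loop of B: split into maximal segments, keep those of length ≥ 3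
def segRuns : List (String × Option Int) → List (List (String × Option Int))
  | [] => []
  | t :: ts =>
    let p := spanRun t ts
    let seg := t :: p.1
    if 3 ≤ seg.length then seg :: segRuns p.2 else segRuns p.2
termination_by l => l.length
decreasing_by all_goals (simp; have := spanRun_len t ts; omega)

def generate_runs_alt (grouped_by_color : List (String × List (String × Option Int))) : List (List (String × Option Int)) :=
  grouped_by_color.foldl (fun runs ct =>
    runs ++ segRuns (PySem.List.sorted ct.2 (fun x => x.2.getD 100) false)) []

-- ===== PRECONDITION & SPEC =====
def Spec_generate_runs (grouped_by_color : List (String × List (String × Option Int))) (out : List (List (String × Option Int))) : Prop := out = generate_runs_alt grouped_by_color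
instance (grouped_by_color : List (String × List (String × Option Int))) (out : List (List (String × Option Int))) : Decidable (Spec_generate_runs grouped_by_color out) := by unfold Spec_generate_runs; infer_instance

-- ===== CLAIM (what is proved, stated in full; the proofs are below) =====
def Claim_equal_generate_runs : Prop := ∀ (grouped_by_color : List (String × List (String × Option Int))), Dom_generate_runs grouped_by_color → Spec_generate_runs grouped_by_color (generate_runs grouped_by_color)

-- ===== LEMMAS AND PROOFS =====

-- Invariant of A's inner loop: with a nonempty current run r (last element p), finishing the
-- fold and flushing equals the already-emitted runs plus B's segmentation continued from r.
theorem loop_eq (ts : List (String × Option Int)) :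
    ∀ (runs : List (List (String × Option Int))) (r : List (String × Option Int))
      (p : String × Option Int), r.getLast? = some p →
    (let st := ts.foldl stepA (runs, r);
     if 3 ≤ st.2.length then st.1 ++ [st.2] else st.1)
    = runs ++ (let q := spanRun p ts;
        if 3 ≤ (r ++ q.1).length then (r ++ q.1) :: segRuns q.2 else segRuns q.2) := by
  induction ts with
  | nil =>
    intro runs r p hp
    simp [spanRun, segRuns]
    split <;> simp
  | cons u us ih =>
    intro runs r p hp
    by_cases hc : contTile p u = true
    · have hstep : stepA (runs, r) u = (runs, r ++ [u]) := by
        simp [stepA, hp, hc]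
      have hlast : (r ++ [u]).getLast? = some u := by simp
      have := ih runs (r ++ [u]) u hlast
      simp only [List.foldl_cons, hstep]
      rw [this]
      simp [spanRun, hc, List.append_assoc]
    · have hstep : stepA (runs, r) u =
          (if 3 ≤ r.length then runs ++ [r] else runs, [u]) := by
        simp [stepA, hp, hc]
      have hlast : ([u] : List (String × Option Int)).getLast? = some u := by simp
      have := ih (if 3 ≤ r.length then runs ++ [r] else runs) [u] u hlast
      simp only [List.foldl_cons, hstep]
      rw [this]
      simp only [spanRun, if_neg hc]
      have hseg : segRuns (u :: us) =
          (let q := spanRun u us;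
           if 3 ≤ ([u] ++ q.1).length then ([u] ++ q.1) :: segRuns q.2 else segRuns q.2) := by
        rw [segRuns]; simp
      rw [← hseg]
      split <;> (try simp) <;> omega

-- per-color equality of the two inner computations
theorem inner_eq (runs : List (List (String × Option Int)))
    (st : List (String × Option Int)) :
    (let f := st.foldl stepA (runs, []);
     if 3 ≤ f.2.length then f.1 ++ [f.2] else f.1) = runs ++ segRuns st := by
  cases st with
  | nil => simp [segRuns]
  | cons t ts =>
    have h0 : stepA (runs, []) t = (runs, [t]) := by simp [stepA]
    have := loop_eq ts runs [t] t (by simp)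
    simp only [List.foldl_cons, h0]
    rw [this]
    simp [segRuns]

theorem fold_eq (g : List (String × List (String × Option Int)))
    (runs : List (List (String × Option Int))) :
    g.foldl (fun runs ct =>
      let sorted_tiles := PySem.List.sorted ct.2 (fun x => x.2.getD 100) false
      let st := sorted_tiles.foldl stepA (runs, [])
      if 3 ≤ st.2.length then st.1 ++ [st.2] else st.1) runs
    = g.foldl (fun runs ct =>
        runs ++ segRuns (PySem.List.sorted ct.2 (fun x => x.2.getD 100) false)) runs := by
  induction g generalizing runs with
  | nil => rfl
  | cons ct g ih =>
    simp only [List.foldl_cons]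
    rw [inner_eq]
    exact ih _

-- ===== VERDICT (by name: the statement is the Claim_ definition above) =====
theorem generate_runs_spec : Claim_equal_generate_runs := by
  intro g _
  unfold Spec_generate_runs generate_runs generate_runs_alt
  exact fold_eq g []
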